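-- pv_equiv track=rewrite | github.com/LochnessFPV/RX5808-Div | generate_icons.py | format_row_8bit
-- ===== SOURCE A (Python) =====
-- def format_row_8bit(row):
--     """Format a row of 8-bit pixels as C array data."""
--     values = []
--     for color, alpha in row:
--         values.extend([f"0x{color:02x}", f"0x{alpha:02x}"])
--
--     # Format in groups for readable output
--     formatted = "    "
--     for i, val in enumerate(values):
--         formatted += val + ", "
--         if (i + 1) % 20 == 0 and i < len(values) - 1:
--             formatted += "\n    "
--
--     return formatted.rstrip() + "\n"
-- ===== SOURCE B (Python) =====
-- def format_row_8bit(row):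
--     """Format a row of 8-bit pixels as C array data."""
--     values = [f"0x{v:02x}" for px in row for v in px]
--     lines = []
--     while values:
--         chunk, values = values[:20], values[20:]
--         lines.append("    " + "".join(v + ", " for v in chunk))
--     return "\n".join(lines).rstrip() + "\n"
-- ===== Notes on version B (the rewrite author's own statement) =====
-- stated objective: simpler
-- what changed: Replaces the per-element accumulator loop with its modulo-20 newline/last-element test by an explicit chunk-of-20 pass: slice 20 values, render each line by a join, and '\n'.join the lines.
import Mathlib
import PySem

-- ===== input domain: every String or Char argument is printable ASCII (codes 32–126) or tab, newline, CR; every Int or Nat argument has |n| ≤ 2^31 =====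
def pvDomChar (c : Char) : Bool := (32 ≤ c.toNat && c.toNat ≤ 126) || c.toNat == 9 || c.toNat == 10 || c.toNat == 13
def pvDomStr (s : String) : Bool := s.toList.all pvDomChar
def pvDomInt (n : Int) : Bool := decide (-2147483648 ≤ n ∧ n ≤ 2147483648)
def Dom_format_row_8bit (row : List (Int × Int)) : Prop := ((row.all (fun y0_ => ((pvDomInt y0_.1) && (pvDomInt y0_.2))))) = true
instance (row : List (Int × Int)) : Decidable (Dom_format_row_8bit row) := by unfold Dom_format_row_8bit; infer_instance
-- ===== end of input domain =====

-- B replaces A's per-element accumulator loop (modulo-20 newline test) by an explicit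
-- chunk-of-20 pass joining the lines; objective: simpler.

-- ===== PORT A =====
-- shared helpers for the Python builtins both sources call (f"0x{v:02x}", str.rstrip);
-- ports work over List Char (exact on this ASCII output) and wrap with String.ofList at the end

-- lowercase hex digit character
def pvHexDigitChar (n : Nat) : Char :=
  if n < 10 then Char.ofNat (48 + n) else Char.ofNat (87 + n)

-- hex digits of a nonnegative number, most significant first (hand port, exact)
def pvHexDigits (n : Nat) : List Char :=
  if _h : n < 16 then [pvHexDigitChar n]
  else pvHexDigits (n / 16) ++ [pvHexDigitChar (n % 16)]
  decreasing_by exact Nat.div_lt_self (by omega) (by omega)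

-- f"0x{v:02x}": Python's sign-aware zero padding to width 2 (hand port, exact)
def pvHexLit02 (v : Int) : List Char :=
  '0' :: 'x' ::
    (if v < 0 then
      '-' :: (List.replicate (1 - (pvHexDigits v.natAbs).length) '0' ++ pvHexDigits v.natAbs)
    else
      List.replicate (2 - (pvHexDigits v.natAbs).length) '0' ++ pvHexDigits v.natAbs)

-- str.rstrip(): drop Python whitespace from the right (hand port, exact)
def pvRstrip (l : List Char) : List Char :=
  (l.reverse.dropWhile fun c =>
    c == ' ' || c == '\t' || c == '\n' || c == '\x0d' || c == '\x0b' || c == '\x0c').reverse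

def pvSpaces4 : List Char := [' ', ' ', ' ', ' ']

-- A's loop: "for i, val in enumerate(values): formatted += val + ', '; if …: formatted += '\n    '"
def pvLoopA (n : Nat) : List (List Char) → Nat → List Char → List Char
  | [], _, acc => acc
  | v :: rest, i, acc =>
      pvLoopA n rest (i + 1)
        (acc ++ v ++ [',', ' '] ++ (if (i + 1) % 20 = 0 ∧ i < n - 1 then '\n' :: pvSpaces4 else []))

def format_row_8bit (row : List (Int × Int)) : String :=
  let values := row.foldl (fun vs p => vs ++ [pvHexLit02 p.1, pvHexLit02 p.2]) []
  String.ofList (pvRstrip (pvLoopA values.length values 0 pvSpaces4) ++ ['\n'])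

-- ===== PORT B =====
-- "".join(v + ", " for v in chunk)
def pvJoinCommas (chunk : List (List Char)) : List Char :=
  (chunk.map (fun v => v ++ [',', ' '])).flatten

-- the while loop: peel 20 values per line
def pvLinesB (vs : List (List Char)) : List (List Char) :=
  match vs with
  | [] => []
  | v :: rest => (pvSpaces4 ++ pvJoinCommas ((v :: rest).take 20)) :: pvLinesB ((v :: rest).drop 20)
  termination_by vs.length
  decreasing_by simp [List.length_drop]

-- "\n".join(lines)
def pvJoinNL : List (List Char) → List Char
  | [] => []
  | [l] => l
  | l :: l' :: ls => l ++ '\n' :: pvJoinNL (l' :: ls)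

def format_row_8bit_alt (row : List (Int × Int)) : String :=
  let values := row.flatMap (fun p => [pvHexLit02 p.1, pvHexLit02 p.2])
  String.ofList (pvRstrip (pvJoinNL (pvLinesB values)) ++ ['\n'])

-- ===== PRECONDITION & SPEC =====
def Spec_format_row_8bit (row : List (Int × Int)) (out : String) : Prop := out = format_row_8bit_alt row
instance (row : List (Int × Int)) (out : String) : Decidable (Spec_format_row_8bit row out) := by unfold Spec_format_row_8bit; infer_instance

-- ===== CLAIM (what is proved, stated in full; the proofs are below) =====
def Claim_equal_format_row_8bit : Prop := ∀ (row : List (Int × Int)), Dom_format_row_8bit row → Spec_format_row_8bit row (format_row_8bit row)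

-- ===== LEMMAS AND PROOFS =====

theorem pvLoopA_cons (n : Nat) (v : List Char) (rest : List (List Char)) (i : Nat) (acc : List Char) :
    pvLoopA n (v :: rest) i acc =
      pvLoopA n rest (i + 1)
        (acc ++ v ++ [',', ' '] ++ (if (i + 1) % 20 = 0 ∧ i < n - 1 then '\n' :: pvSpaces4 else [])) := rfl

theorem pvJoinCommas_cons (v : List Char) (rest : List (List Char)) :
    pvJoinCommas (v :: rest) = v ++ [',', ' '] ++ pvJoinCommas rest := by
  simp [pvJoinCommas]

theorem pvLinesB_nil : pvLinesB [] = [] := by rw [pvLinesB.eq_def]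

theorem pvLinesB_eq (vs : List (List Char)) (h : vs ≠ []) :
    pvLinesB vs = (pvSpaces4 ++ pvJoinCommas (vs.take 20)) :: pvLinesB (vs.drop 20) := by
  cases vs with
  | nil => exact absurd rfl h
  | cons v r => rw [pvLinesB.eq_def]

theorem pvLinesB_ne (vs : List (List Char)) (h : vs ≠ []) : pvLinesB vs ≠ [] := by
  rw [pvLinesB_eq vs h]; simp

theorem pvJoinNL_cons (a : List Char) (l : List (List Char)) (h : l ≠ []) :
    pvJoinNL (a :: l) = a ++ '\n' :: pvJoinNL l := by
  cases l with
  | nil => exact absurd rfl h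
  | cons b bs => rfl

-- A's extend-fold builds the same value list as B's comprehension
theorem pv_values_eq (row : List (Int × Int)) :
    row.foldl (fun vs p => vs ++ [pvHexLit02 p.1, pvHexLit02 p.2]) [] =
      row.flatMap (fun p => [pvHexLit02 p.1, pvHexLit02 p.2]) := by
  simpa using PySem.List.foldl_append_eq_flatMap
    (l := row) (g := fun p => [pvHexLit02 p.1, pvHexLit02 p.2]) (acc := [])

-- within a final (≤ 20 element) chunk the newline condition never fires
theorem pv_loopA_last (chunk : List (List Char)) :
    ∀ (i j : Nat) (acc : List Char), i % 20 = j % 20 → j + chunk.length ≤ 20 →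
      pvLoopA (i + chunk.length) chunk i acc = acc ++ pvJoinCommas chunk := by
  induction chunk with
  | nil => intro i j acc _ _; simp [pvLoopA, pvJoinCommas]
  | cons v rest ih =>
      intro i j acc hmod hle
      simp only [List.length_cons] at hle ⊢
      have hcond : ¬ ((i + 1) % 20 = 0 ∧ i < i + (rest.length + 1) - 1) := by omega
      rw [pvLoopA_cons, if_neg hcond, List.append_nil,
          show i + (rest.length + 1) = (i + 1) + rest.length by omega,
          ih (i + 1) (j + 1) _ (by omega) (by omega), pvJoinCommas_cons]
      simp [List.append_assoc]

-- a full chunk of 20 followed by more values emits its 20 entries then the line break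
theorem pv_loopA_full (chunk : List (List Char)) :
    ∀ (i j : Nat) (acc : List Char) (rest : List (List Char)), chunk ≠ [] → rest ≠ [] →
      i % 20 = j % 20 → j + chunk.length = 20 →
      pvLoopA (i + chunk.length + rest.length) (chunk ++ rest) i acc =
        pvLoopA (i + chunk.length + rest.length) rest (i + chunk.length)
          (acc ++ pvJoinCommas chunk ++ '\n' :: pvSpaces4) := by
  induction chunk with
  | nil => intro _ _ _ _ h; exact absurd rfl h
  | cons v rest' ih =>
      intro i j acc rest _ hrest hmod hfull
      have hrl : 1 ≤ rest.length := List.length_pos_of_ne_nil hrest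
      cases rest' with
      | nil =>
          simp only [List.length_cons, List.length_nil] at hfull ⊢
          have hcond : (i + 1) % 20 = 0 ∧ i < i + (0 + 1) + rest.length - 1 := by
            constructor <;> omega
          rw [List.cons_append, List.nil_append, pvLoopA_cons, if_pos hcond, pvJoinCommas_cons]
          simp [pvJoinCommas, List.append_assoc]
      | cons w ws =>
          simp only [List.length_cons] at hfull ⊢
          have hcond : ¬ ((i + 1) % 20 = 0 ∧ i < i + (ws.length + 1 + 1) + rest.length - 1) := by
            omega
          rw [List.cons_append, pvLoopA_cons, if_neg hcond, List.append_nil]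
          have hn : i + (ws.length + 1 + 1) + rest.length
              = (i + 1) + (ws.length + 1) + rest.length := by omega
          have hi : i + (ws.length + 1 + 1) = (i + 1) + (ws.length + 1) := by omega
          rw [hn, hi]
          have hih := ih (i + 1) (j + 1) (acc ++ v ++ [',', ' ']) rest (by simp) hrest
            (by omega) (by simp only [List.length_cons]; omega)
          simp only [List.length_cons] at hih
          rw [hih]
          simp [pvJoinCommas, List.append_assoc]

-- main bridge: A's accumulator loop renders exactly B's joined lines
theorem pv_loop_eq_lines (m : Nat) : ∀ (vs : List (List Char)), vs.length ≤ m → vs ≠ [] →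
    ∀ (q : Nat) (acc : List Char),
      pvLoopA (20 * q + vs.length) vs (20 * q) (acc ++ pvSpaces4) =
        acc ++ pvJoinNL (pvLinesB vs) := by
  induction m with
  | zero => intro vs hle hne; cases vs with | nil => exact absurd rfl hne | cons => simp at hle
  | succ m ih =>
      intro vs hle hne q acc
      by_cases h20 : vs.length ≤ 20
      · -- single (final) line
        have htake : vs.take 20 = vs := List.take_of_length_le h20
        have hdrop : vs.drop 20 = [] := List.drop_eq_nil_of_le h20
        have hS := pv_loopA_last vs (20 * q) 0 (acc ++ pvSpaces4) (by omega) (by omega)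
        rw [hS, pvLinesB_eq vs hne, htake, hdrop, pvLinesB_nil]
        simp [pvJoinNL, List.append_assoc]
      · -- full line of 20 then recurse on the rest
        replace h20 := Nat.lt_of_not_le h20
        have hsplit : vs.take 20 ++ vs.drop 20 = vs := List.take_append_drop 20 vs
        have htl : (vs.take 20).length = 20 := by simp; omega
        have hdl : (vs.drop 20).length = vs.length - 20 := by simp
        have hdne : vs.drop 20 ≠ [] := by
          intro h; rw [h] at hdl; simp at hdl; omega
        have htne : vs.take 20 ≠ [] := by
          intro h; rw [h] at htl; simp at htl
        have hfull := pv_loopA_full (vs.take 20) (20 * q) 0 (acc ++ pvSpaces4) (vs.drop 20)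
          htne hdne (by omega) (by omega)
        rw [htl, hsplit] at hfull
        have harith : 20 * q + vs.length = 20 * q + 20 + (vs.drop 20).length := by
          rw [hdl]; omega
        rw [harith, hfull]
        have hih := ih (vs.drop 20) (by omega) hdne (q + 1)
          (acc ++ pvSpaces4 ++ pvJoinCommas (vs.take 20) ++ ['\n'])
        rw [show 20 * (q + 1) = 20 * q + 20 by omega] at hih
        rw [show acc ++ pvSpaces4 ++ pvJoinCommas (vs.take 20) ++ '\n' :: pvSpaces4
              = (acc ++ pvSpaces4 ++ pvJoinCommas (vs.take 20) ++ ['\n']) ++ pvSpaces4 by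
              simp [List.append_assoc], hih]
        rw [pvLinesB_eq vs hne, pvJoinNL_cons _ _ (pvLinesB_ne _ hdne)]
        simp [List.append_assoc]

-- ===== VERDICT (by name: the statement is the Claim_ definition above) =====
theorem format_row_8bit_spec : Claim_equal_format_row_8bit := by
  intro row _
  unfold Spec_format_row_8bit format_row_8bit format_row_8bit_alt
  simp only [pv_values_eq]
  cases hrow : row with
  | nil => simp only [List.flatMap_nil]; rw [pvLinesB_nil]; rfl
  | cons p rest =>
      set vs := (p :: rest).flatMap (fun p => [pvHexLit02 p.1, pvHexLit02 p.2]) with hvs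
      have hne : vs ≠ [] := by simp [hvs]
      have h := pv_loop_eq_lines vs.length vs le_rfl hne 0 []
      simp only [Nat.mul_zero, Nat.zero_add, List.nil_append] at h
      rw [h]
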